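-- pv_equiv track=rewrite | github.com/nubibus18/Vital-Monitoring-Patch- | Firmware/ADPD1080 Evaluation and  SetupCode/ADPD1080regconfig.py | set_tia_gain_register
-- ===== SOURCE A (Python) =====
-- def set_tia_gain_register(
--     slotb_tia_gain_4, slotb_tia_gain_3, slotb_tia_gain_2,
--     slota_tia_gain_4, slota_tia_gain_3, slota_tia_gain_2
-- ):
--     """Set TIA gain values for Time Slots A and B in register 0x55.
--
--     Parameters:
--         slotb_tia_gain_4 (int): TIA gain for Time Slot B, Channel 4 (0-3).
--         slotb_tia_gain_3 (int): TIA gain for Time Slot B, Channel 3 (0-3).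
--         slotb_tia_gain_2 (int): TIA gain for Time Slot B, Channel 2 (0-3).
--         slota_tia_gain_4 (int): TIA gain for Time Slot A, Channel 4 (0-3).
--         slota_tia_gain_3 (int): TIA gain for Time Slot A, Channel 3 (0-3).
--         slota_tia_gain_2 (int): TIA gain for Time Slot A, Channel 2 (0-3).
--
--     Returns:
--         tuple: (register address, register value)
--     """
--     register_address = 0x55
--
--     # Validate inputs (should be in range 0-3)
--     for gain in [slotb_tia_gain_4, slotb_tia_gain_3, slotb_tia_gain_2,
--                  slota_tia_gain_4, slota_tia_gain_3, slota_tia_gain_2]: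
--         if gain not in range(4):
--             raise ValueError("TIA gain values must be between 0 and 3")
--
--     # Construct the register value
--     register_value = (
--         (slotb_tia_gain_4 << 10) |
--         (slotb_tia_gain_3 << 8)  |
--         (slotb_tia_gain_2 << 6)  |
--         (slota_tia_gain_4 << 4)  |
--         (slota_tia_gain_3 << 2)  |
--         (slota_tia_gain_2 << 0)
--     )
--
--     return register_address, register_value
-- ===== SOURCE B (Python) =====
-- def set_tia_gain_register(
--     slotb_tia_gain_4, slotb_tia_gain_3, slotb_tia_gain_2,
--     slota_tia_gain_4, slota_tia_gain_3, slota_tia_gain_2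
-- ):
--     """Pack six 2-bit TIA gains into register 0x55 with a Horner-style fold."""
--     register_value = 0
--     for gain in (slotb_tia_gain_4, slotb_tia_gain_3, slotb_tia_gain_2,
--                  slota_tia_gain_4, slota_tia_gain_3, slota_tia_gain_2):
--         if gain not in range(4):
--             raise ValueError("TIA gain values must be between 0 and 3")
--         register_value = (register_value << 2) | gain
--     return 0x55, register_value
-- ===== Notes on version B (the rewrite author's own statement) =====
-- stated objective: simpler
-- what changed: B builds the register value by a single Horner-style fold over the six gains ((acc << 2) | gain), fusing validation and packing into one loop, instead of a validation pass followed by six hard-coded shifts OR'd together.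
import Mathlib
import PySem

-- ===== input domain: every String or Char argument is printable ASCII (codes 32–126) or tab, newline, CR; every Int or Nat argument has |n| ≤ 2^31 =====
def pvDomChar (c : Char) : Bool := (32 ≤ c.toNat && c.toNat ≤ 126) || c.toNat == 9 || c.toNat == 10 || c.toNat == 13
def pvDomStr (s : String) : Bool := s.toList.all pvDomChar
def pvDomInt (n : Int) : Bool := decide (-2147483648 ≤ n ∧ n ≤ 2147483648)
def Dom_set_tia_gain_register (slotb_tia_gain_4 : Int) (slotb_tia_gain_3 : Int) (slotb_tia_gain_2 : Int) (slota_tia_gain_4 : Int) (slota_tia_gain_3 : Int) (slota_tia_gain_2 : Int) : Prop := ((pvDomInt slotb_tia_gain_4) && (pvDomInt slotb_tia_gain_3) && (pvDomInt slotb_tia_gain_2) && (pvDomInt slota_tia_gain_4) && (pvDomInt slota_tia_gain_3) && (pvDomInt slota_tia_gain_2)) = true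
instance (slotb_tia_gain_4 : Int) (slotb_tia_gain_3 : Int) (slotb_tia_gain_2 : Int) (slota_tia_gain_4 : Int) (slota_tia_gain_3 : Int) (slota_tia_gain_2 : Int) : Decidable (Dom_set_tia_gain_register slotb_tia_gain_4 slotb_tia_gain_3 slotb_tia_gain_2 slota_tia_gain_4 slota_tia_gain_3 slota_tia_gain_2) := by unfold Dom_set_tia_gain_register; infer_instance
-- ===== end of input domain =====

-- B packs the six 2-bit gains with a Horner-style fold ((acc << 2) | gain), fusing validation and packing into one loop, instead of A's six hard-coded shifts OR'd together.
-- ===== PORT A =====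
def set_tia_gain_register (slotb_tia_gain_4 : Int) (slotb_tia_gain_3 : Int) (slotb_tia_gain_2 : Int) (slota_tia_gain_4 : Int) (slota_tia_gain_3 : Int) (slota_tia_gain_2 : Int) : Int × Int :=
  let register_address : Int := 0x55
  -- the validation loop raises outside Pre_; inside Pre_ it is a no-op
  let register_value : Int :=
    PySem.Int.bor (PySem.Int.bor (PySem.Int.bor (PySem.Int.bor (PySem.Int.bor
      (slotb_tia_gain_4 <<< (10 : Nat))
      (slotb_tia_gain_3 <<< (8 : Nat)))
      (slotb_tia_gain_2 <<< (6 : Nat)))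
      (slota_tia_gain_4 <<< (4 : Nat)))
      (slota_tia_gain_3 <<< (2 : Nat)))
      (slota_tia_gain_2 <<< (0 : Nat))
  (register_address, register_value)

-- ===== PORT B =====
def set_tia_gain_register_alt (slotb_tia_gain_4 : Int) (slotb_tia_gain_3 : Int) (slotb_tia_gain_2 : Int) (slota_tia_gain_4 : Int) (slota_tia_gain_3 : Int) (slota_tia_gain_2 : Int) : Int × Int :=
  -- the in-loop range check raises outside Pre_; inside Pre_ only the accumulation happens
  let register_value : Int :=
    [slotb_tia_gain_4, slotb_tia_gain_3, slotb_tia_gain_2,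
     slota_tia_gain_4, slota_tia_gain_3, slota_tia_gain_2].foldl
      (fun acc g => PySem.Int.bor (acc <<< (2 : Nat)) g) 0
  (0x55, register_value)

-- ===== PRECONDITION & SPEC =====
-- Pre_ excludes exactly the inputs on which A (and B) raise ValueError: any gain outside 0..3.
def Pre_set_tia_gain_register (slotb_tia_gain_4 : Int) (slotb_tia_gain_3 : Int) (slotb_tia_gain_2 : Int) (slota_tia_gain_4 : Int) (slota_tia_gain_3 : Int) (slota_tia_gain_2 : Int) : Prop :=
  (0 ≤ slotb_tia_gain_4 ∧ slotb_tia_gain_4 < 4) ∧ (0 ≤ slotb_tia_gain_3 ∧ slotb_tia_gain_3 < 4) ∧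
  (0 ≤ slotb_tia_gain_2 ∧ slotb_tia_gain_2 < 4) ∧ (0 ≤ slota_tia_gain_4 ∧ slota_tia_gain_4 < 4) ∧
  (0 ≤ slota_tia_gain_3 ∧ slota_tia_gain_3 < 4) ∧ (0 ≤ slota_tia_gain_2 ∧ slota_tia_gain_2 < 4)
instance (slotb_tia_gain_4 : Int) (slotb_tia_gain_3 : Int) (slotb_tia_gain_2 : Int) (slota_tia_gain_4 : Int) (slota_tia_gain_3 : Int) (slota_tia_gain_2 : Int) : Decidable (Pre_set_tia_gain_register slotb_tia_gain_4 slotb_tia_gain_3 slotb_tia_gain_2 slota_tia_gain_4 slota_tia_gain_3 slota_tia_gain_2) := by unfold Pre_set_tia_gain_register; infer_instance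

def pvWitness_set_tia_gain_register : Int × Int × Int × Int × Int × Int := (1, 2, 3, 0, 1, 2)

def Spec_set_tia_gain_register (slotb_tia_gain_4 : Int) (slotb_tia_gain_3 : Int) (slotb_tia_gain_2 : Int) (slota_tia_gain_4 : Int) (slota_tia_gain_3 : Int) (slota_tia_gain_2 : Int) (out : Int × Int) : Prop := out = set_tia_gain_register_alt slotb_tia_gain_4 slotb_tia_gain_3 slotb_tia_gain_2 slota_tia_gain_4 slota_tia_gain_3 slota_tia_gain_2
instance (slotb_tia_gain_4 : Int) (slotb_tia_gain_3 : Int) (slotb_tia_gain_2 : Int) (slota_tia_gain_4 : Int) (slota_tia_gain_3 : Int) (slota_tia_gain_2 : Int) (out : Int × Int) : Decidable (Spec_set_tia_gain_register slotb_tia_gain_4 slotb_tia_gain_3 slotb_tia_gain_2 slota_tia_gain_4 slota_tia_gain_3 slota_tia_gain_2 out) := by unfold Spec_set_tia_gain_register; infer_instance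

-- ===== CLAIM (what is proved, stated in full; the proofs are below) =====
def Claim_equal_set_tia_gain_register : Prop := ∀ (slotb_tia_gain_4 : Int) (slotb_tia_gain_3 : Int) (slotb_tia_gain_2 : Int) (slota_tia_gain_4 : Int) (slota_tia_gain_3 : Int) (slota_tia_gain_2 : Int), Dom_set_tia_gain_register slotb_tia_gain_4 slotb_tia_gain_3 slotb_tia_gain_2 slota_tia_gain_4 slota_tia_gain_3 slota_tia_gain_2 → Pre_set_tia_gain_register slotb_tia_gain_4 slotb_tia_gain_3 slotb_tia_gain_2 slota_tia_gain_4 slota_tia_gain_3 slota_tia_gain_2 → Spec_set_tia_gain_register slotb_tia_gain_4 slotb_tia_gain_3 slotb_tia_gain_2 slota_tia_gain_4 slota_tia_gain_3 slota_tia_gain_2 (set_tia_gain_register slotb_tia_gain_4 slotb_tia_gain_3 slotb_tia_gain_2 slota_tia_gain_4 slota_tia_gain_3 slota_tia_gain_2)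

-- ===== LEMMAS AND PROOFS =====
-- With each gain in 0..3 (Pre_), both sides are decided by exhausting the 4^6 gain combinations.
-- ===== VERDICT (by name: the statement is the Claim_ definition above) =====
set_option maxHeartbeats 2000000 in
theorem set_tia_gain_register_spec : Claim_equal_set_tia_gain_register := by
  intro b4 b3 b2 a4 a3 a2 _ hpre
  obtain ⟨⟨hb4l, hb4r⟩, ⟨hb3l, hb3r⟩, ⟨hb2l, hb2r⟩, ⟨ha4l, ha4r⟩, ⟨ha3l, ha3r⟩, ⟨ha2l, ha2r⟩⟩ := hpre
  show _ = set_tia_gain_register_alt b4 b3 b2 a4 a3 a2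
  interval_cases b4 <;> interval_cases b3 <;> interval_cases b2 <;>
    interval_cases a4 <;> interval_cases a3 <;> interval_cases a2 <;> decide
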